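-- pv_equiv track=rewrite | github.com/gilad-rubin/hypergraph | src/hypergraph/viz/_common.py | disambiguate_external_input_ids
-- ===== SOURCE A (Python) =====
-- def external_input_display_name(param: str) -> str:
--     """Return the leaf segment of a dot-pathed external-input name.
--
--     Synthetic INPUT-node IDs (``input_<name>``) and visible labels use the
--     leaf segment so users see ``x`` rather than ``middle.inner.x``. The
--     full dot path is an implementation detail of input addressing.
--     """
--     if not param:
--         return param
--     return param.rsplit(".", 1)[-1]
--
-- def disambiguate_external_input_ids(
--     params_by_group: list[list[str]],
-- ) -> dict[str, str]:
--     """Map each dot-pathed external-input name to a unique synthetic id.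
--
--     Returns ``{full_param: id_safe_name}``. When two groups would otherwise
--     collide on the leaf segment (e.g. ``A.x`` and ``B.x`` both map to
--     ``x``), each colliding name keeps its full dot-path so the synthetic
--     ``input_*`` node IDs stay unique.
--     """
--     leaf_counts: dict[str, int] = {}
--     for params in params_by_group:
--         for p in params:
--             leaf = external_input_display_name(p)
--             leaf_counts[leaf] = leaf_counts.get(leaf, 0) + 1
--
--     mapping: dict[str, str] = {}
--     for params in params_by_group:
--         for p in params:
--             leaf = external_input_display_name(p)
--             mapping[p] = leaf if leaf_counts.get(leaf, 0) == 1 else p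
--     return mapping
-- ===== SOURCE B (Python) =====
-- def external_input_display_name(param: str) -> str:
--     if not param:
--         return param
--     return param.rsplit(".", 1)[-1]
--
--
-- def disambiguate_external_input_ids(params_by_group):
--     """Single pass: optimistically map each new leaf, and fix up the earlier
--     claimant in place when a collision (or a duplicate) appears later."""
--     mapping = {}
--     owner = {}  # leaf -> its sole param so far, or None once the leaf collided
--     for params in params_by_group:
--         for p in params:
--             leaf = external_input_display_name(p)
--             if leaf not in owner:
--                 owner[leaf] = p
--                 mapping[p] = leaf
--             else:
--                 q = owner[leaf]
--                 if q is not None: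
--                     mapping[q] = q
--                     owner[leaf] = None
--                 mapping[p] = p
--     return mapping
-- ===== Notes on version B (the rewrite author's own statement) =====
-- stated objective: alternative
-- what changed: A makes two full passes (first count every leaf, then re-scan all params to assign leaf or full path); B is a single pass that optimistically maps each fresh leaf and, on a later collision or duplicate, fixes the earlier claimant's entry in place via an owner table.
import Mathlib
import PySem

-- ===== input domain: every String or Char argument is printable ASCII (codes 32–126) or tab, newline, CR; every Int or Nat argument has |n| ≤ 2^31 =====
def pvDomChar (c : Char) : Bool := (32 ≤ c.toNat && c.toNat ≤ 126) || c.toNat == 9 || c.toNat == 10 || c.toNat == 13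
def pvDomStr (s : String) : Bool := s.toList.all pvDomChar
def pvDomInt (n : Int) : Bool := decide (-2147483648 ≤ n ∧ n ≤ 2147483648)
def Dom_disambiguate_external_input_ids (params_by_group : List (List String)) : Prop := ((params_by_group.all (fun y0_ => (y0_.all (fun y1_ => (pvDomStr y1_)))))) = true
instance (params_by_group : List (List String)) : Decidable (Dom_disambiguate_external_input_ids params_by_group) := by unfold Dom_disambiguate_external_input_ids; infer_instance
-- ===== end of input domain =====

-- B replaces A's two full passes (count all leaves, then re-scan to assign) by a single pass that
-- optimistically maps each fresh leaf and fixes up the earlier claimant in place on a collision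
-- (objective: alternative one-pass algorithm; equivalence is about the returned dict).


-- ===== PORT A =====
-- external_input_display_name: `param.rsplit(".", 1)[-1]` ported by hand (PySem has no rsplit):
-- the segment after the LAST '.', i.e. the reversed longest dot-free suffix; exact for every string.
def pvLeaf (p : String) : String :=
  if p = "" then p
  else String.ofList ((p.toList.reverse.takeWhile (fun c => c != '.')).reverse)

def disambiguate_external_input_ids (params_by_group : List (List String)) : List (String × String) :=
  let leaf_counts : PySem.Dict String Int :=
    params_by_group.foldl (fun d params =>
      params.foldl (fun d p =>
        let leaf := pvLeaf p
        d.insert leaf (d.getD leaf 0 + 1)) d) PySem.Dict.empty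
  let mapping : PySem.Dict String String :=
    params_by_group.foldl (fun d params =>
      params.foldl (fun d p =>
        let leaf := pvLeaf p
        d.insert p (if leaf_counts.getD leaf 0 == 1 then leaf else p)) d) PySem.Dict.empty
  mapping.items

-- ===== PORT B =====
-- one loop body of Source B: state = (mapping, owner); owner maps a leaf to its sole param so far,
-- or to none once that leaf has collided ('q is None' in Source B).
def pvStepB (st : PySem.Dict String String × PySem.Dict String (Option String)) (p : String) :
    PySem.Dict String String × PySem.Dict String (Option String) :=
  let leaf := pvLeaf p
  match st.2.get? leaf with
  | none => (st.1.insert p leaf, st.2.insert leaf (some p))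
  | some (some q) => ((st.1.insert q q).insert p p, st.2.insert leaf none)
  | some none => (st.1.insert p p, st.2)

def disambiguate_external_input_ids_alt (params_by_group : List (List String)) : List (String × String) :=
  (params_by_group.foldl (fun st params => params.foldl pvStepB st)
    (PySem.Dict.empty, PySem.Dict.empty)).1.items

-- ===== PRECONDITION & SPEC =====
def Spec_disambiguate_external_input_ids (params_by_group : List (List String)) (out : List (String × String)) : Prop := out = disambiguate_external_input_ids_alt params_by_group
instance (params_by_group : List (List String)) (out : List (String × String)) : Decidable (Spec_disambiguate_external_input_ids params_by_group out) := by unfold Spec_disambiguate_external_input_ids; infer_instance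

-- ===== CLAIM (what is proved, stated in full; the proofs are below) =====
def Claim_equal_disambiguate_external_input_ids : Prop := ∀ (params_by_group : List (List String)), Dom_disambiguate_external_input_ids params_by_group → Spec_disambiguate_external_input_ids params_by_group (disambiguate_external_input_ids params_by_group)

-- ===== LEMMAS AND PROOFS =====

-- number of occurrences of a leaf among the flattened params
def pvCnt (l : List String) (leaf : String) : Nat := (l.map pvLeaf).count leaf

-- the value A's final mapping assigns to a param, given the whole flattened list
def pvVal (l : List String) (p : String) : String :=
  if pvCnt l (pvLeaf p) = 1 then pvLeaf p else p

-- the canonical dict whose keys are the distinct elements of l in first-occurrence order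
def pvMk (g : String → String) (l : List String) : PySem.Dict String String :=
  PySem.Dict.mk ((PySem.List.dedup l).map (fun k => (k, g k)))

-- canonical form of the final mapping after processing l
def pvM (l : List String) : PySem.Dict String String := pvMk (pvVal l) l

-- canonical lookup table of B's owner dict after processing l
def pvOwn (l : List String) (leaf : String) : Option (Option String) :=
  if pvCnt l leaf = 0 then none
  else if pvCnt l leaf = 1 then some ((l.filter (fun x => pvLeaf x == leaf)).head?)
  else some none

lemma pvCnt_eq_filter_length (l : List String) (leaf : String) :
    pvCnt l leaf = (l.filter (fun x => pvLeaf x == leaf)).length := by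
  simp [pvCnt, List.count_eq_countP, List.countP_eq_length_filter, List.filter_map,
    Function.comp_def]

lemma pvCnt_append (l : List String) (p : String) (leaf : String) :
    pvCnt (l ++ [p]) leaf = pvCnt l leaf + (if pvLeaf p = leaf then 1 else 0) := by
  simp [pvCnt, List.count_append, List.count_singleton]

lemma pvCnt_pos_of_mem {l : List String} {p : String} (h : p ∈ l) :
    1 ≤ pvCnt l (pvLeaf p) := by
  unfold pvCnt
  exact List.count_pos_iff.mpr (List.mem_map_of_mem (f := pvLeaf) h)

-- an element whose leaf occurs somewhere in l is in the filter of that leaf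
lemma pvMem_filter_of_leaf {l : List String} {p : String} (h : p ∈ l) :
    p ∈ l.filter (fun x => pvLeaf x == pvLeaf p) := by
  exact List.mem_filter.mpr ⟨h, by simp⟩

lemma pvDedup_append (l : List String) (p : String) :
    PySem.List.dedup (l ++ [p]) =
      if p ∈ l then PySem.List.dedup l else PySem.List.dedup l ++ [p] := by
  simp only [PySem.List.dedup_eq_ofList, PySem.Set.ofList_eq_foldl, List.foldl_append,
    List.foldl_cons, List.foldl_nil]
  rw [← PySem.Set.ofList_eq_foldl]
  simp [PySem.Set.add, PySem.Set.contains, PySem.Set.mem_ofList]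

lemma contains_pvMk (g : String → String) (l : List String) (k : String) :
    (pvMk g l).contains k = decide (k ∈ l) := by
  rw [PySem.Dict.contains_eq_decide_mem_keys]
  simp [pvMk, PySem.Dict.keys, Function.comp_def, PySem.Set.mem_ofList]

lemma pvMk_congr {g g' : String → String} {l : List String} (h : ∀ k ∈ l, g k = g' k) :
    pvMk g l = pvMk g' l := by
  unfold pvMk
  apply PySem.Dict.ext
  apply List.map_congr_left
  intro k hk
  rw [h k (by simpa [PySem.List.mem_dedup] using hk)]

lemma pvMk_append_mem (g : String → String) {l : List String} {p : String} (h : p ∈ l) :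
    pvMk g (l ++ [p]) = pvMk g l := by
  unfold pvMk
  rw [pvDedup_append, if_pos h]

lemma pvMk_insert_mem (g : String → String) {l : List String} {p : String} (h : p ∈ l)
    (v : String) :
    (pvMk g l).insert p v = pvMk (fun k => if k = p then v else g k) l := by
  apply PySem.Dict.ext
  rw [PySem.Dict.items_insert_of_contains _ _ (by simp [contains_pvMk, h])]
  show ((PySem.List.dedup l).map (fun k => (k, g k))).map _ = _
  rw [List.map_map]
  apply List.map_congr_left
  intro k _
  by_cases hk : k = p <;> simp [hk]

lemma pvMk_insert_not_mem (g : String → String) {l : List String} {p : String} (h : p ∉ l)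
    (v : String) :
    (pvMk g l).insert p v = pvMk (fun k => if k = p then v else g k) (l ++ [p]) := by
  apply PySem.Dict.ext
  rw [PySem.Dict.items_insert_of_not_contains _ _ (by simp [contains_pvMk, h])]
  show (PySem.List.dedup l).map (fun k => (k, g k)) ++ [(p, v)] = _
  unfold pvMk
  rw [pvDedup_append, if_neg h, List.map_append]
  congr 1
  · apply List.map_congr_left
    intro k hk
    have : k ≠ p := by
      intro hkp; exact h (by simpa [PySem.List.mem_dedup, hkp] using hk)
    simp [this]
  · simp

-- owner lookups at an unaffected leaf do not change
lemma pvOwn_append_ne {p : String} {leaf : String} (h : pvLeaf p ≠ leaf) (l : List String) :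
    pvOwn (l ++ [p]) leaf = pvOwn l leaf := by
  unfold pvOwn
  rw [pvCnt_append, if_neg h, Nat.add_zero, List.filter_append]
  simp [h]

-- a leaf with no occurrence has an empty filter
lemma pvFilter_nil_of_cnt_zero {l : List String} {leaf : String} (h : pvCnt l leaf = 0) :
    l.filter (fun x => pvLeaf x == leaf) = [] := by
  rw [pvCnt_eq_filter_length] at h
  exact List.eq_nil_of_length_eq_zero h

-- a leaf with exactly one occurrence has a singleton filter
lemma pvFilter_singleton_of_cnt_one {l : List String} {leaf : String} (h : pvCnt l leaf = 1) :
    ∃ q, l.filter (fun x => pvLeaf x == leaf) = [q] ∧ q ∈ l ∧ pvLeaf q = leaf := by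
  rw [pvCnt_eq_filter_length] at h
  obtain ⟨q, hq⟩ := List.length_eq_one_iff.mp h
  refine ⟨q, hq, ?_, ?_⟩
  · have := List.mem_filter.mp (hq ▸ (List.mem_singleton_self q))
    exact this.1
  · have := List.mem_filter.mp (hq ▸ (List.mem_singleton_self q))
    simpa using this.2

-- the nested for-loops are a fold over the flattened list
lemma pvFoldl_nested {σ : Type} (f : σ → String → σ) (init : σ) (pbg : List (List String)) :
    pbg.foldl (fun s params => params.foldl f s) init = (pbg.flatMap id).foldl f init := by
  induction pbg generalizing init with
  | nil => rfl
  | cons g t ih => simp [List.foldl_append, ih]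

-- an insert-keyed-by-the-element fold from the empty dict is the canonical dedup map
lemma pvMapFold (g : String → String) (l : List String) :
    l.foldl (fun d p => d.insert p (g p)) PySem.Dict.empty = pvMk g l := by
  induction l using List.reverseRecOn with
  | nil => rfl
  | append_singleton l p ih =>
      rw [List.foldl_append, List.foldl_cons, List.foldl_nil, ih]
      by_cases h : p ∈ l
      · rw [pvMk_insert_mem g h, pvMk_append_mem g h]
        apply pvMk_congr
        intro k _
        by_cases hk : k = p <;> simp [hk]
      · rw [pvMk_insert_not_mem g h]
        apply pvMk_congr
        intro k _
        by_cases hk : k = p <;> simp [hk]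

-- the value assigned to k is unchanged by appending a param with a different leaf
lemma pvVal_append_ne {p k : String} (h : pvLeaf k ≠ pvLeaf p) (l : List String) :
    pvVal (l ++ [p]) k = pvVal l k := by
  have hc : pvCnt (l ++ [p]) (pvLeaf k) = pvCnt l (pvLeaf k) := by
    rw [pvCnt_append, if_neg (fun e => h e.symm), Nat.add_zero]
  unfold pvVal
  rw [hc]

-- a member of l sharing p's leaf, when that leaf occurs once, is the filter's element
lemma pvEq_of_filter_singleton {l : List String} {p k q : String}
    (hfq : l.filter (fun x => pvLeaf x == pvLeaf p) = [q])
    (hk : k ∈ l) (hleaf : pvLeaf k = pvLeaf p) : k = q := by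
  have := pvMem_filter_of_leaf hk
  rw [hleaf, hfq] at this
  simpa using this

-- B's loop invariant: the mapping is the canonical dict, the owner looks up as pvOwn
lemma pvB_loop (l : List String) :
    (l.foldl pvStepB (PySem.Dict.empty, PySem.Dict.empty)).1 = pvM l ∧
      ∀ leaf, (l.foldl pvStepB (PySem.Dict.empty, PySem.Dict.empty)).2.get? leaf = pvOwn l leaf := by
  induction l using List.reverseRecOn with
  | nil =>
      refine ⟨rfl, fun leaf => ?_⟩
      simp [pvOwn, pvCnt, PySem.Dict.get?_empty]
  | append_singleton l p ih =>
      obtain ⟨ih1, ih2⟩ := ih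
      rw [List.foldl_append, List.foldl_cons, List.foldl_nil]
      have hget := ih2 (pvLeaf p)
      by_cases h0 : pvCnt l (pvLeaf p) = 0
      · -- fresh leaf: B maps p to its leaf and records p as the owner
        have hnm : p ∉ l := fun hm => by have := pvCnt_pos_of_mem hm; omega
        have hown : pvOwn l (pvLeaf p) = none := by simp [pvOwn, h0]
        rw [hown] at hget
        simp only [pvStepB, hget]
        constructor
        · rw [ih1]
          show (pvMk (pvVal l) l).insert p (pvLeaf p) = pvM (l ++ [p])
          rw [pvMk_insert_not_mem _ hnm]
          apply pvMk_congr
          intro k hk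
          by_cases hkp : k = p
          · subst hkp
            have : pvCnt (l ++ [k]) (pvLeaf k) = 1 := by rw [pvCnt_append, h0]; simp
            simp [pvVal, this]
          · have hkl : k ∈ l := by
              rcases List.mem_append.mp hk with h | h
              · exact h
              · exact absurd (List.mem_singleton.mp h) hkp
            have hne : pvLeaf k ≠ pvLeaf p := fun e => by
              have := pvCnt_pos_of_mem hkl; rw [e] at this; omega
            rw [if_neg hkp, pvVal_append_ne hne]
        · intro leaf
          rw [PySem.Dict.get?_insert]
          by_cases hleaf : leaf = pvLeaf p
          · subst hleaf
            have hcnt : pvCnt (l ++ [p]) (pvLeaf p) = 1 := by rw [pvCnt_append, h0]; simp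
            have hfil : (l ++ [p]).filter (fun x => pvLeaf x == pvLeaf p) = [p] := by
              rw [List.filter_append, pvFilter_nil_of_cnt_zero h0]
              simp
            simp [pvOwn, hcnt, hfil]
          · rw [if_neg hleaf, ih2, pvOwn_append_ne (fun e => hleaf e.symm)]
      · by_cases h1 : pvCnt l (pvLeaf p) = 1
        · -- second occurrence of the leaf: fix up the previous owner q, mark collided
          obtain ⟨q, hfq, hql, hqleaf⟩ := pvFilter_singleton_of_cnt_one h1
          have hown : pvOwn l (pvLeaf p) = some (some q) := by simp [pvOwn, h1, hfq]
          rw [hown] at hget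
          simp only [pvStepB, hget]
          have hcnt2 : pvCnt (l ++ [p]) (pvLeaf p) = 2 := by rw [pvCnt_append, h1]; simp
          constructor
          · rw [ih1]
            show ((pvMk (pvVal l) l).insert q q).insert p p = pvM (l ++ [p])
            rw [pvMk_insert_mem _ hql]
            by_cases hp : p ∈ l
            · have hpq : p = q := pvEq_of_filter_singleton hfq hp rfl
              subst hpq
              rw [pvMk_insert_mem _ hql]
              unfold pvM
              rw [pvMk_append_mem _ hql]
              apply pvMk_congr
              intro k hk
              by_cases hkq : k = p
              · subst hkq
                simp [pvVal, hcnt2]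
              · have hne : pvLeaf k ≠ pvLeaf p := fun e => hkq (pvEq_of_filter_singleton hfq hk e)
                rw [if_neg hkq, if_neg hkq, pvVal_append_ne hne]
            · rw [pvMk_insert_not_mem _ hp]
              apply pvMk_congr
              intro k hk
              by_cases hkp : k = p
              · subst hkp
                simp [pvVal, hcnt2]
              · have hkl : k ∈ l := by
                  rcases List.mem_append.mp hk with h | h
                  · exact h
                  · exact absurd (List.mem_singleton.mp h) hkp
                rw [if_neg hkp]
                by_cases hkq : k = q
                · subst hkq
                  have hv : pvVal (l ++ [p]) k = k := by
                    unfold pvVal; rw [hqleaf, hcnt2]; simp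
                  rw [if_pos rfl, hv]
                · have hne : pvLeaf k ≠ pvLeaf p := fun e =>
                    hkq (pvEq_of_filter_singleton hfq hkl e)
                  rw [if_neg hkq, pvVal_append_ne hne]
          · intro leaf
            rw [PySem.Dict.get?_insert]
            by_cases hleaf : leaf = pvLeaf p
            · subst hleaf
              simp [pvOwn, hcnt2]
            · rw [if_neg hleaf, ih2, pvOwn_append_ne (fun e => hleaf e.symm)]
        · -- already collided: B just maps p to itself; the owner table is unchanged
          have h2 : 2 ≤ pvCnt l (pvLeaf p) := by omega
          have hown : pvOwn l (pvLeaf p) = some none := by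
            unfold pvOwn; rw [if_neg h0, if_neg h1]
          rw [hown] at hget
          simp only [pvStepB, hget]
          have hcnt3 : pvCnt (l ++ [p]) (pvLeaf p) = pvCnt l (pvLeaf p) + 1 := by
            rw [pvCnt_append]; simp
          constructor
          · rw [ih1]
            show (pvMk (pvVal l) l).insert p p = pvM (l ++ [p])
            have hcongr : ∀ k ∈ l ++ [p],
                (if k = p then p else pvVal l k) = pvVal (l ++ [p]) k := by
              intro k hk
              by_cases hkp : k = p
              · subst hkp
                have : pvCnt (l ++ [k]) (pvLeaf k) ≠ 1 := by omega
                simp [pvVal, this]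
              · have hkl : k ∈ l := by
                  rcases List.mem_append.mp hk with h | h
                  · exact h
                  · exact absurd (List.mem_singleton.mp h) hkp
                rw [if_neg hkp]
                by_cases hne : pvLeaf k = pvLeaf p
                · have hv1 : pvVal l k = k := by
                    unfold pvVal; rw [hne, if_neg (by omega)]
                  have hv2 : pvVal (l ++ [p]) k = k := by
                    unfold pvVal; rw [hne, hcnt3, if_neg (by omega)]
                  rw [hv1, hv2]
                · rw [pvVal_append_ne hne]
            by_cases hp : p ∈ l
            · rw [pvMk_insert_mem _ hp]
              unfold pvM
              rw [pvMk_append_mem _ hp]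
              apply pvMk_congr
              intro k hk
              exact hcongr k (List.mem_append.mpr (Or.inl hk))
            · rw [pvMk_insert_not_mem _ hp]
              exact pvMk_congr hcongr
          · intro leaf
            rw [ih2]
            by_cases hleaf : leaf = pvLeaf p
            · subst hleaf
              unfold pvOwn
              rw [if_neg h0, if_neg h1, if_neg (by omega), if_neg (by omega)]
            · rw [pvOwn_append_ne (fun e => hleaf e.symm)]

def pvCounts (flat : List String) : PySem.Dict String Int :=
  flat.foldl (fun d p => d.insert (pvLeaf p) (d.getD (pvLeaf p) 0 + 1)) PySem.Dict.empty

lemma pvCounts_getD (flat : List String) (leaf : String) :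
    (pvCounts flat).getD leaf 0 = (pvCnt flat leaf : Int) := by
  unfold pvCounts
  rw [← List.foldl_map (f := pvLeaf)
        (g := fun (d : PySem.Dict String Int) x => d.insert x (d.getD x 0 + 1))]
  rw [PySem.Dict.getD_foldl_insert_add_one]
  simp [pvCnt]

-- A's second pass, over the flattened params, builds exactly the canonical mapping
lemma pvA_fold (flat : List String) :
    flat.foldl (fun d p =>
        d.insert p
          (if (flat.foldl (fun d p => d.insert (pvLeaf p) (d.getD (pvLeaf p) 0 + 1))
                  (PySem.Dict.empty : PySem.Dict String Int)).getD (pvLeaf p) 0 == 1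
           then pvLeaf p else p))
      PySem.Dict.empty = pvM flat := by
  have h := PySem.List.foldl_congr_mem (l := flat) (init := (PySem.Dict.empty : PySem.Dict String String))
    (f := fun d p =>
        d.insert p
          (if (flat.foldl (fun d p => d.insert (pvLeaf p) (d.getD (pvLeaf p) 0 + 1))
                  (PySem.Dict.empty : PySem.Dict String Int)).getD (pvLeaf p) 0 == 1
           then pvLeaf p else p))
    (g := fun d p => d.insert p (pvVal flat p))
    (by
      intro acc x _
      show acc.insert x
          (if (pvCounts flat).getD (pvLeaf x) 0 == 1 then pvLeaf x else x) =
        acc.insert x (pvVal flat x)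
      rw [pvCounts_getD flat (pvLeaf x)]
      unfold pvVal
      by_cases hx : pvCnt flat (pvLeaf x) = 1 <;> simp [hx])
  rw [h, pvMapFold]; rfl

-- ===== VERDICT (by name: the statement is the Claim_ definition above) =====
theorem disambiguate_external_input_ids_spec : Claim_equal_disambiguate_external_input_ids := by
  intro pbg _
  unfold Spec_disambiguate_external_input_ids
  unfold disambiguate_external_input_ids disambiguate_external_input_ids_alt
  simp only [pvFoldl_nested]
  rw [(pvB_loop (pbg.flatMap id)).1, pvA_fold]
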